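-- pv_equiv track=rewrite | github.com/zhangwanyu2020/Text_class | bayes_class/quetions_of_bayes_class.py | get_class_rates
-- ===== SOURCE A (Python) =====
-- def get_class_rates(train_y):
--     class_counts = {}
--     len_y = len(train_y)
--     for i in range(len_y):
--         class_level = train_y[i]
--         if class_level in class_counts:
--             class_counts[class_level] += 1
--         else:
--             class_counts[class_level] = 1
--
--     return class_counts
-- ===== SOURCE B (Python) =====
-- def get_class_rates(train_y):
--     uniques = dict.fromkeys(train_y)
--     return {label: train_y.count(label) for label in uniques}
-- ===== Notes on version B (the rewrite author's own statement) =====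
-- stated objective: alternative
-- what changed: Replaces the accumulating index loop with a two-phase approach: first collect the distinct labels (dict.fromkeys), then one counting scan per distinct label via list.count.
import Mathlib
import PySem

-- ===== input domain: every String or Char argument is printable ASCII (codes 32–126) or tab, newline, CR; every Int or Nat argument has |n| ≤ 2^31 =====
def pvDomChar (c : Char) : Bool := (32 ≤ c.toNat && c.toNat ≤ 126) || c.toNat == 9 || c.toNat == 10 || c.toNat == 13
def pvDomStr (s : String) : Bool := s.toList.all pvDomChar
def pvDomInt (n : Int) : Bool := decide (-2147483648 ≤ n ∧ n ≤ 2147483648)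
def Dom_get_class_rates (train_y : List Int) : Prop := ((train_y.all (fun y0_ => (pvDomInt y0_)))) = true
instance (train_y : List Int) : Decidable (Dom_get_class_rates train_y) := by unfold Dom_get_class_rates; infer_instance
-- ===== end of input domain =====

-- B builds the distinct labels first (dict.fromkeys) and then counts each with list.count instead of A's single accumulating index loop.
-- ===== PORT A =====
-- loop body: class_level = train_y[i]; if class_level in class_counts: +=1 else: =1
def pvStepA (class_counts : PySem.Dict Int Int) (class_level : Int) : PySem.Dict Int Int :=
  if class_counts.contains class_level then
    class_counts.modify class_level 0 (· + 1)
  else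
    class_counts.insert class_level 1

-- for i in range(len_y): <body with class_level = train_y[i]>
def get_class_rates (train_y : List Int) : List (Int × Int) :=
  ((PySem.List.pyRange 0 (PySem.List.len train_y) 1).foldl
    (fun class_counts i => pvStepA class_counts (PySem.List.pyGetD train_y i 0))
    PySem.Dict.empty).items

-- ===== PORT B =====
-- uniques = dict.fromkeys(train_y); {label: train_y.count(label) for label in uniques}
def get_class_rates_alt (train_y : List Int) : List (Int × Int) :=
  (PySem.List.dedup train_y).map (fun label => (label, (PySem.List.count train_y label : Int)))

-- ===== PRECONDITION & SPEC =====
def Spec_get_class_rates (train_y : List Int) (out : List (Int × Int)) : Prop := out = get_class_rates_alt train_y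
instance (train_y : List Int) (out : List (Int × Int)) : Decidable (Spec_get_class_rates train_y out) := by unfold Spec_get_class_rates; infer_instance

-- ===== CLAIM (what is proved, stated in full; the proofs are below) =====
def Claim_equal_get_class_rates : Prop := ∀ (train_y : List Int), Dom_get_class_rates train_y → Spec_get_class_rates train_y (get_class_rates train_y)

-- ===== LEMMAS AND PROOFS =====

-- A's branch (present: += 1, absent: = 1) is exactly Dict.modify with default 0
theorem step_eq_modify (d : PySem.Dict Int Int) (x : Int) :
    pvStepA d x = d.modify x 0 (· + 1) := by
  unfold pvStepA
  by_cases h : d.contains x = true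
  · simp [h]
  · have hc : d.contains x = false := by simpa using h
    have hany : (d.items.any fun p => p.1 == x) = false := by
      simpa [PySem.Dict.contains] using hc
    have hfind : d.items.find? (fun p => p.1 == x) = none := by
      rw [List.find?_eq_none]
      intro p hp
      simpa using List.any_eq_false.mp hany p hp
    simp [PySem.Dict.modify, PySem.Dict.insert, PySem.Dict.getD, PySem.Dict.get?, hfind]

-- ===== VERDICT (by name: the statement is the Claim_ definition above) =====
theorem get_class_rates_spec : Claim_equal_get_class_rates := by
  intro train_y _
  unfold Spec_get_class_rates get_class_rates get_class_rates_alt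
  rw [PySem.List.foldl_pyRange_zero_pyGetD train_y 0 pvStepA PySem.Dict.empty]
  rw [funext₂ step_eq_modify]
  rw [← PySem.Dict.counter_eq_foldl, PySem.Dict.items_counter,
      ← PySem.List.dedup_eq_ofList]
  simp [PySem.List.count_eq]
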